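-- pv_equiv track=rewrite | github.com/jihwan0123/Algorithm | Programmers/위클리_챌린지/최소직사각형.py | solution
-- ===== SOURCE A (Python) =====
-- def solution(sizes):
--     if len(sizes) == 1:
--         return sizes[0][0] * sizes[0][1]
--
--     temp = []
--     for size in sizes:
--         temp.append((max(size), min(size)))
--
--     a = sorted(temp, key=lambda x:(-x[0], x[1]))
--     x = a[0]
--     temp.remove(x)
--     b = sorted(temp, key=lambda x:(-x[1]))
--
--     return a[0][0] * b[0][1]
-- ===== SOURCE B (Python) =====
-- def solution(sizes):
--     if len(sizes) == 1:
--         return sizes[0][0] * sizes[0][1]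
--     M = max(sizes[0])
--     m0 = min(sizes[0])
--     L1, L2 = m0, None
--     for s in sizes[1:]:
--         h, l = max(s), min(s)
--         if h > M:
--             M, m0 = h, l
--         elif h == M and l < m0:
--             m0 = l
--         if L2 is None:
--             L1, L2 = max(l, L1), min(l, L1)
--         elif l >= L1:
--             L1, L2 = l, L1
--         elif l > L2:
--             L2 = l
--     return M * (L2 if m0 == L1 else L1)
-- ===== Notes on version B (the rewrite author's own statement) =====
-- stated objective: alternative
-- what changed: Replaces A's two key-sorts plus tuple remove() by one linear loop that simultaneously maintains the running largest max-side M, the smallest min-side m0 among rows attaining M, and the top two min-sides L1 >= L2; the answer is M * (L2 if m0 == L1 else L1).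
import Mathlib
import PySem

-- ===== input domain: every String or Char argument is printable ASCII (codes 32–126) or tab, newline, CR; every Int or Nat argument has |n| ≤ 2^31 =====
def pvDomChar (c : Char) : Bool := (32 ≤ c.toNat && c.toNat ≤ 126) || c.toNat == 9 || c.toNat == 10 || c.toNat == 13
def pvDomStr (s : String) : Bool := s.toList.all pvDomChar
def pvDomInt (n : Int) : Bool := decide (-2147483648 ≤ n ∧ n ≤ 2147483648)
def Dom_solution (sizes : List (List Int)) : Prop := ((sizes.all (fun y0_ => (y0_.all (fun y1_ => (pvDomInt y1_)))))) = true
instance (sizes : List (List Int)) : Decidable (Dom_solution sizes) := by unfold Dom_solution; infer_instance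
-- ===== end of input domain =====

-- B replaces A's two key-sorts plus remove() by ONE linear loop keeping (M, m0, L1, L2):
-- the largest max-side M, the smallest min-side m0 among rows attaining M, and the top
-- two min-sides L1 ≥ L2; the answer is M * (L2 if m0 == L1 else L1).

-- ===== PORT A =====
def solution (sizes : List (List Int)) : Int :=
  if sizes.length == 1 then
    ((PySem.List.pyGet? ((PySem.List.pyGet? sizes 0).getD []) 0).getD 0) *
      ((PySem.List.pyGet? ((PySem.List.pyGet? sizes 0).getD []) 1).getD 0)
  else
    -- temp = []; for size in sizes: temp.append((max(size), min(size)))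
    let temp := sizes.foldl (fun acc s =>
      acc ++ [((PySem.List.max? s (fun x => x)).getD 0, (PySem.List.min? s (fun x => x)).getD 0)]) []
    -- a = sorted(temp, key=lambda x: (-x[0], x[1]))
    let a := PySem.List.sorted2 temp (fun x => -x.1) (fun x => x.2)
    let x := (PySem.List.pyGet? a 0).getD (0, 0)
    -- temp.remove(x)
    let temp' := (PySem.List.remove? temp x).getD []
    -- b = sorted(temp, key=lambda x: -x[1])
    let b := PySem.List.sorted temp' (fun x => -x.2)
    x.1 * ((PySem.List.pyGet? b 0).getD (0, 0)).2

-- ===== PORT B =====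
-- the loop body of Source B (h, l already computed): first the (M, m0) update, then (L1, L2)
def solutionAltStep (st : Int × Int × Int × Option Int) (h l : Int) :
    Int × Int × Int × Option Int :=
  let (M, m0, L1, L2) := st
  let Mm0 := if h > M then (h, l) else if h == M ∧ l < m0 then (M, l) else (M, m0)
  let L12 :=
    match L2 with
    | none => (max l L1, some (min l L1))
    | some v => if l ≥ L1 then (l, some L1) else if l > v then (L1, some l) else (L1, some v)
  (Mm0.1, Mm0.2, L12.1, L12.2)

def solution_alt (sizes : List (List Int)) : Int :=
  if sizes.length == 1 then
    ((PySem.List.pyGet? ((PySem.List.pyGet? sizes 0).getD []) 0).getD 0) *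
      ((PySem.List.pyGet? ((PySem.List.pyGet? sizes 0).getD []) 1).getD 0)
  else
    let M0 := (PySem.List.max? ((PySem.List.pyGet? sizes 0).getD []) (fun x => x)).getD 0
    let m00 := (PySem.List.min? ((PySem.List.pyGet? sizes 0).getD []) (fun x => x)).getD 0
    -- for s in sizes[1:]: …
    let st := (PySem.List.slice sizes (some 1) none).foldl
      (fun st s =>
        solutionAltStep st ((PySem.List.max? s (fun x => x)).getD 0)
          ((PySem.List.min? s (fun x => x)).getD 0))
      (M0, m00, m00, none)
    let (M, m0, L1, L2) := st
    M * (if m0 == L1 then L2.getD 0 else L1)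

-- ===== PRECONDITION & SPEC =====
-- Pre_ excludes exactly the inputs where A raises: the empty list (IndexError on a[0]),
-- a single row with fewer than two entries (IndexError), and, with two or more rows,
-- an empty row (ValueError from max()/min() of an empty sequence).
def Pre_solution (sizes : List (List Int)) : Prop :=
  (sizes.length = 1 ∧ 2 ≤ (sizes.headD []).length) ∨ (2 ≤ sizes.length ∧ ∀ s ∈ sizes, s ≠ [])
instance (sizes : List (List Int)) : Decidable (Pre_solution sizes) := by
  unfold Pre_solution; infer_instance
def pvWitness_solution : List (List Int) := [[60, 50], [30, 70], [60, 30], [80, 40]]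

def Spec_solution (sizes : List (List Int)) (out : Int) : Prop := out = solution_alt sizes
instance (sizes : List (List Int)) (out : Int) : Decidable (Spec_solution sizes out) := by
  unfold Spec_solution; infer_instance

-- ===== CLAIM (what is proved, stated in full; the proofs are below) =====
def Claim_equal_solution : Prop :=
  ∀ (sizes : List (List Int)), Dom_solution sizes → Pre_solution sizes →
    Spec_solution sizes (solution sizes)

-- ===== LEMMAS AND PROOFS =====

-- the comparator sorted2 uses for key = (fun p => -p.1, fun p => p.2)
def lexBefore (a b : Int × Int) : Bool :=
  decide (-a.1 < -b.1) || (!decide (-b.1 < -a.1) && decide (a.2 < b.2))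

-- "a may stand before b" in A's first sort: the reflexive lexicographic order
def lexR (a b : Int × Int) : Prop := b.1 < a.1 ∨ (b.1 = a.1 ∧ a.2 ≤ b.2)

theorem lexBefore_true {a b : Int × Int} (h : lexBefore a b = true) : lexR a b := by
  unfold lexBefore at h; unfold lexR
  simp only [Bool.or_eq_true, Bool.and_eq_true, Bool.not_eq_true', decide_eq_true_eq,
    decide_eq_false_iff_not] at h
  omega

theorem lexBefore_false {a b : Int × Int} (h : lexBefore a b = false) : lexR b a := by
  unfold lexBefore at h; unfold lexR
  simp only [Bool.or_eq_false_iff, Bool.and_eq_false_iff, Bool.not_eq_false',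
    decide_eq_true_eq, decide_eq_false_iff_not] at h
  omega

theorem lexR_trans {a b c : Int × Int} (h1 : lexR a b) (h2 : lexR b c) : lexR a c := by
  unfold lexR at *; omega

theorem insertBy_pairwise_lexR (x : Int × Int) (ys : List (Int × Int))
    (h : ys.Pairwise lexR) : (PySem.List.insertBy lexBefore x ys).Pairwise lexR := by
  induction ys with
  | nil => simp [PySem.List.insertBy]
  | cons y ys ih =>
    rw [PySem.List.insertBy]
    rw [List.pairwise_cons] at h
    obtain ⟨hy, hys⟩ := h
    by_cases hb : lexBefore x y = true
    · simp only [hb, if_true]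
      refine List.Pairwise.cons ?_ (List.Pairwise.cons hy hys)
      intro z hz
      rcases List.mem_cons.mp hz with rfl | hz
      · exact lexBefore_true hb
      · exact lexR_trans (lexBefore_true hb) (hy z hz)
    · rw [Bool.not_eq_true] at hb
      simp only [hb]
      refine List.Pairwise.cons ?_ (ih hys)
      intro z hz
      rcases (PySem.List.mem_insertBy lexBefore x z ys).mp hz with rfl | hz
      · exact lexBefore_false hb
      · exact hy z hz

theorem foldl_insertBy_pairwise_lexR (xs : List (Int × Int)) (acc : List (Int × Int))
    (h : acc.Pairwise lexR) :
    (xs.foldl (fun acc x => PySem.List.insertBy lexBefore x acc) acc).Pairwise lexR := by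
  induction xs generalizing acc with
  | nil => exact h
  | cons x xs ih => exact ih _ (insertBy_pairwise_lexR x acc h)

theorem sorted2_head_lex (temp : List (Int × Int)) {x : Int × Int} {t : List (Int × Int)}
    (h : PySem.List.sorted2 temp (fun p => -p.1) (fun p => p.2) = x :: t) :
    x ∈ temp ∧ ∀ y ∈ temp, y.1 ≤ x.1 ∧ (y.1 = x.1 → x.2 ≤ y.2) := by
  have hperm := PySem.List.sorted2_perm temp (fun p => -p.1) (fun p => p.2) false
  rw [h] at hperm
  have e : PySem.List.sorted2 temp (fun p => -p.1) (fun p => p.2) =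
      temp.foldl (fun acc x => PySem.List.insertBy lexBefore x acc) [] := rfl
  have hpw : (x :: t).Pairwise lexR := by
    rw [← h, e]; exact foldl_insertBy_pairwise_lexR temp [] (by simp)
  constructor
  · exact hperm.mem_iff.mp (List.mem_cons_self)
  · intro y hy
    rcases List.mem_cons.mp (hperm.mem_iff.mpr hy) with rfl | hyt
    · omega
    · have := (List.pairwise_cons.mp hpw).1 y hyt
      unfold lexR at this; omega

-- the invariant of B's single pass over the processed pairs Q (a nonempty multiset)
def BInv (Q : List (Int × Int)) (st : Int × Int × Int × Option Int) : Prop :=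
  (st.1 ∈ Q.map Prod.fst ∧ ∀ y ∈ Q.map Prod.fst, y ≤ st.1) ∧
  (st.2.1 ∈ (Q.filter (fun p => p.1 == st.1)).map Prod.snd ∧
    ∀ y ∈ (Q.filter (fun p => p.1 == st.1)).map Prod.snd, st.2.1 ≤ y) ∧
  (match st.2.2.2 with
   | none => Q.map Prod.snd = [st.2.2.1]
   | some v => ∃ rest, (Q.map Prod.snd).Perm (st.2.2.1 :: v :: rest) ∧
       v ≤ st.2.2.1 ∧ ∀ y ∈ rest, y ≤ v)

theorem inv_init (p : Int × Int) : BInv [p] (p.1, p.2, p.2, none) := by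
  refine ⟨⟨by simp, by simp⟩, ⟨?_, ?_⟩, by simp⟩
  · simp [List.filter]
  · intro y hy; simp [List.filter] at hy; simp [hy]

-- the (M, m0) clauses are preserved by the first update of the loop body
theorem step_Mm0 (Q : List (Int × Int)) (M m0 h l : Int)
    (hMmem : M ∈ Q.map Prod.fst) (hMmax : ∀ y ∈ Q.map Prod.fst, y ≤ M)
    (hm0mem : m0 ∈ (Q.filter (fun p => p.1 == M)).map Prod.snd)
    (hm0min : ∀ y ∈ (Q.filter (fun p => p.1 == M)).map Prod.snd, m0 ≤ y) :
    ((if h > M then (h, l) else if h == M ∧ l < m0 then (M, l) else (M, m0)).1 ∈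
        (((h, l) :: Q).map Prod.fst) ∧
      ∀ y ∈ ((h, l) :: Q).map Prod.fst,
        y ≤ (if h > M then (h, l) else if h == M ∧ l < m0 then (M, l) else (M, m0)).1) ∧
    ((if h > M then (h, l) else if h == M ∧ l < m0 then (M, l) else (M, m0)).2 ∈
        ((((h, l) :: Q).filter (fun p =>
          p.1 == (if h > M then (h, l) else if h == M ∧ l < m0 then (M, l) else (M, m0)).1)).map
            Prod.snd) ∧
      ∀ y ∈ (((h, l) :: Q).filter (fun p =>
          p.1 == (if h > M then (h, l) else if h == M ∧ l < m0 then (M, l) else (M, m0)).1)).map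
            Prod.snd,
        (if h > M then (h, l) else if h == M ∧ l < m0 then (M, l) else (M, m0)).2 ≤ y) := by
  by_cases h1 : h > M
  · simp only [if_pos h1]
    have hfil : Q.filter (fun p => p.1 == h) = [] := by
      refine List.filter_eq_nil_iff.mpr ?_
      intro q hq
      have := hMmax q.1 (List.mem_map.mpr ⟨q, hq, rfl⟩)
      simp; omega
    refine ⟨⟨by simp, ?_⟩, ?_, ?_⟩
    · intro y hy
      rcases List.mem_cons.mp hy with rfl | hy
      · omega
      · have := hMmax y hy; omega
    · simp [hfil]
    · intro y hy
      simp [hfil] at hy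
      omega
  · by_cases h2 : h == M ∧ l < m0
    · simp only [if_neg h1, if_pos h2]
      obtain ⟨h2a, h2b⟩ := h2
      have h2a' : h = M := by simpa using h2a
      have hfp : ((h, l) : Int × Int).1 == M := by simp [h2a']
      refine ⟨⟨by simp [hMmem], ?_⟩, ?_, ?_⟩
      · intro y hy
        rcases List.mem_cons.mp hy with rfl | hy
        · omega
        · exact hMmax y hy
      · simp [hfp]
      · intro y hy
        simp only [List.filter_cons, hfp, if_pos, List.map_cons, List.mem_cons] at hy
        rcases hy with rfl | hy
        · omega
        · have := hm0min y hy; omega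
    · simp only [if_neg h1, if_neg h2]
      refine ⟨⟨by simp [hMmem], ?_⟩, ?_, ?_⟩
      · intro y hy
        rcases List.mem_cons.mp hy with rfl | hy
        · omega
        · exact hMmax y hy
      · by_cases hP : h = M
        · simp [hP, hm0mem]
        · have : (((h, l) : Int × Int).1 == M) = false := by simp [hP]
          simp [this, hm0mem]
      · intro y hy
        by_cases hP : h = M
        · have hl : ¬ l < m0 := fun hc => h2 ⟨by simp [hP], hc⟩
          simp only [List.filter_cons] at hy
          simp only [hP] at hy
          simp only [BEq.rfl, if_pos, List.map_cons, List.mem_cons] at hy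
          rcases hy with rfl | hy
          · omega
          · exact hm0min y hy
        · have hne : (((h, l) : Int × Int).1 == M) = false := by simp [hP]
          simp only [List.filter_cons, hne] at hy
          simp only [Bool.false_eq_true, if_false] at hy
          exact hm0min y hy

-- the top-two-of-the-min-sides clause is preserved by the second update
theorem step_L12 (Q : List (Int × Int)) (L1 : Int) (L2 : Option Int) (h l : Int)
    (htt : match L2 with
      | none => Q.map Prod.snd = [L1]
      | some v => ∃ rest, (Q.map Prod.snd).Perm (L1 :: v :: rest) ∧ v ≤ L1 ∧ ∀ y ∈ rest, y ≤ v) :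
    (match (match L2 with
        | none => (max l L1, some (min l L1))
        | some v => if l ≥ L1 then (l, some L1) else if l > v then (L1, some l)
            else (L1, some v)).2 with
      | none => (((h, l) :: Q).map Prod.snd) =
          [(match L2 with
            | none => (max l L1, some (min l L1))
            | some v => if l ≥ L1 then (l, some L1) else if l > v then (L1, some l)
                else (L1, some v)).1]
      | some v => ∃ rest, ((((h, l) :: Q).map Prod.snd)).Perm
          ((match L2 with
            | none => (max l L1, some (min l L1))
            | some v => if l ≥ L1 then (l, some L1) else if l > v then (L1, some l)
                else (L1, some v)).1 :: v :: rest) ∧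
          v ≤ (match L2 with
            | none => (max l L1, some (min l L1))
            | some v => if l ≥ L1 then (l, some L1) else if l > v then (L1, some l)
                else (L1, some v)).1 ∧ ∀ y ∈ rest, y ≤ v) := by
  cases L2 with
  | none =>
    simp only at htt ⊢
    refine ⟨[], ?_, by omega, by simp⟩
    rw [List.map_cons, htt]
    rcases le_total l L1 with hle | hle
    · have hmax : max l L1 = L1 := by omega
      have hmin : min l L1 = l := by omega
      rw [hmax, hmin]
      exact List.Perm.swap _ _ _
    · have hmax : max l L1 = l := by omega
      have hmin : min l L1 = L1 := by omega
      rw [hmax, hmin]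
  | some v =>
    obtain ⟨rest, hperm, hvL1, hrest⟩ := htt
    by_cases hge : l ≥ L1
    · simp only [if_pos hge]
      refine ⟨v :: rest, ?_, by omega, ?_⟩
      · rw [List.map_cons]
        exact hperm.cons l
      · intro y hy
        rcases List.mem_cons.mp hy with rfl | hy
        · omega
        · have := hrest y hy; omega
    · by_cases hgt : l > v
      · simp only [if_neg hge, if_pos hgt]
        refine ⟨v :: rest, ?_, by omega, ?_⟩
        · rw [List.map_cons]
          exact (hperm.cons l).trans (List.Perm.swap _ _ _)
        · intro y hy
          rcases List.mem_cons.mp hy with rfl | hy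
          · omega
          · have := hrest y hy; omega
      · simp only [if_neg hge, if_neg hgt]
        refine ⟨l :: rest, ?_, by omega, ?_⟩
        · rw [List.map_cons]
          refine (hperm.cons l).trans ?_
          refine (List.Perm.swap _ _ _).trans ?_
          exact (List.Perm.swap _ _ _).cons L1
        · intro y hy
          rcases List.mem_cons.mp hy with rfl | hy
          · omega
          · have := hrest y hy; omega

theorem inv_step (Q : List (Int × Int)) (st : Int × Int × Int × Option Int)
    (p : Int × Int) (hInv : BInv Q st) : BInv (p :: Q) (solutionAltStep st p.1 p.2) := by
  obtain ⟨h, l⟩ := p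
  obtain ⟨M, m0, L1, L2⟩ := st
  obtain ⟨⟨hMmem, hMmax⟩, ⟨hm0mem, hm0min⟩, htt⟩ := hInv
  have hA := step_Mm0 Q M m0 h l hMmem hMmax hm0mem hm0min
  have hB := step_L12 Q L1 L2 h l htt
  exact ⟨hA.1, hA.2, hB⟩

theorem inv_fold (P : List (Int × Int)) (Q : List (Int × Int))
    (st : Int × Int × Int × Option Int) (h : BInv Q st) :
    ∃ Q', Q'.Perm (Q ++ P) ∧
      BInv Q' (P.foldl (fun st p => solutionAltStep st p.1 p.2) st) := by
  induction P generalizing Q st with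
  | nil => exact ⟨Q, by simp, h⟩
  | cons p P ih =>
    obtain ⟨Q', hperm, hinv⟩ := ih (p :: Q) _ (inv_step Q st p h)
    refine ⟨Q', ?_, hinv⟩
    refine hperm.trans ?_
    have : (p :: Q ++ P) = p :: (Q ++ P) := by simp
    rw [this]
    exact (List.perm_middle (a := p) (l₁ := Q) (l₂ := P)).symm

theorem solution_spec_aux (sizes : List (List Int)) (hpre : Pre_solution sizes) :
    solution sizes = solution_alt sizes := by
  by_cases hlen : sizes.length = 1
  · unfold solution solution_alt
    simp [hlen]
  · have hlen2 : 2 ≤ sizes.length := by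
      rcases hpre with ⟨h1, _⟩ | ⟨h2, _⟩
      · exact absurd h1 hlen
      · exact h2
    obtain ⟨s0, rest, rfl⟩ : ∃ s0 rest, sizes = s0 :: rest := by
      cases sizes with
      | nil => simp at hlen2
      | cons s0 rest => exact ⟨s0, rest, rfl⟩
    unfold solution solution_alt
    have hne : ((s0 :: rest).length == 1) = false := by
      simp only [beq_eq_false_iff_ne]; exact hlen
    simp only [hne, Bool.false_eq_true, if_false]
    set f : List Int → Int × Int := fun s =>
      ((PySem.List.max? s (fun x => x)).getD 0, (PySem.List.min? s (fun x => x)).getD 0) with hf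
    -- A's temp is the mapped pair list
    rw [PySem.List.foldl_append_singleton_eq_map
      (f := fun s => ((PySem.List.max? s (fun x => x)).getD 0,
                      (PySem.List.min? s (fun x => x)).getD 0)) (s0 :: rest) []]
    simp only [List.nil_append]
    set temp : List (Int × Int) := (s0 :: rest).map f with htemp
    have htlen : 2 ≤ temp.length := by simpa [htemp] using hlen2
    have htne : temp ≠ [] := by
      intro h0; rw [h0] at htlen; simp at htlen
    -- A's first sort is nonempty; take its head x
    obtain ⟨x, t, hxt⟩ : ∃ x t, PySem.List.sorted2 temp (fun p => -p.1) (fun p => p.2) = x :: t := by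
      cases hs : PySem.List.sorted2 temp (fun p => -p.1) (fun p => p.2) with
      | nil =>
        have := PySem.List.sorted2_perm temp (fun p => -p.1) (fun p => p.2) false
        rw [hs] at this
        exact absurd (this.symm.eq_nil) htne
      | cons x t => exact ⟨x, t, rfl⟩
    obtain ⟨hxmem, hxall⟩ := sorted2_head_lex temp hxt
    rw [hxt]
    have hget : (PySem.List.pyGet? (x :: t) 0).getD ((0 : Int), (0 : Int)) = x := by
      simp [PySem.List.pyGet?, PySem.List.pyIdx?]
    rw [hget]
    -- A removes x; the second sort is nonempty
    have hrmA := PySem.List.remove?_eq_some_erase temp x hxmem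
    rw [hrmA]
    simp only [Option.getD_some]
    have herne : temp.erase x ≠ [] := by
      have hl : (temp.erase x).length = temp.length - 1 := List.length_erase_of_mem hxmem
      intro h0; rw [h0] at hl; simp at hl; omega
    obtain ⟨h2, u, hhu⟩ : ∃ h2 u, PySem.List.sorted (temp.erase x) (fun p => -p.2) = h2 :: u := by
      cases hs : PySem.List.sorted (temp.erase x) (fun p => -p.2) with
      | nil =>
        rw [PySem.List.sorted_eq_nil_iff] at hs
        exact absurd hs herne
      | cons h2 u => exact ⟨h2, u, rfl⟩
    rw [hhu]
    have hgetb : (PySem.List.pyGet? (h2 :: u) 0).getD ((0 : Int), (0 : Int)) = h2 := by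
      simp [PySem.List.pyGet?, PySem.List.pyIdx?]
    rw [hgetb]
    have hh2mem : h2 ∈ temp.erase x :=
      (PySem.List.sorted_perm (temp.erase x) (fun p => -p.2) false).mem_iff.mp
        (by rw [hhu]; exact List.mem_cons_self)
    have hh2max : ∀ y ∈ temp.erase x, y.2 ≤ h2.2 := by
      intro y hy
      have := PySem.List.key_head_sorted_le (temp.erase x) (fun p => -p.2) hhu y hy
      simpa using this
    -- B's side: sizes[0] is s0, sizes[1:] is rest
    have hget0 : (PySem.List.pyGet? (s0 :: rest) 0).getD ([] : List Int) = s0 := by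
      simp [PySem.List.pyGet?, PySem.List.pyIdx?]
    rw [hget0, PySem.List.slice_from_one]
    simp only [List.tail_cons]
    -- B's fold over the rows is the fold of the step over the mapped pairs
    have hfold : rest.foldl
        (fun st s => solutionAltStep st ((PySem.List.max? s (fun x => x)).getD 0)
          ((PySem.List.min? s (fun x => x)).getD 0)) ((f s0).1, (f s0).2, (f s0).2, none) =
        (rest.map f).foldl (fun st p => solutionAltStep st p.1 p.2)
          ((f s0).1, (f s0).2, (f s0).2, none) := by
      rw [List.foldl_map]
    rw [show ((PySem.List.max? s0 (fun x => x)).getD 0) = (f s0).1 from rfl,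
        show ((PySem.List.min? s0 (fun x => x)).getD 0) = (f s0).2 from rfl, hfold]
    obtain ⟨Q', hQperm, hinv⟩ := inv_fold (rest.map f) [f s0]
      ((f s0).1, (f s0).2, (f s0).2, none) (inv_init (f s0))
    have hQtemp : Q'.Perm temp := by simpa [htemp] using hQperm
    set st := (rest.map f).foldl (fun st p => solutionAltStep st p.1 p.2)
      ((f s0).1, (f s0).2, (f s0).2, none) with hst
    obtain ⟨M, m0, L1, L2⟩ := st
    obtain ⟨⟨hMmem, hMmax⟩, ⟨hm0mem, hm0min⟩, htt⟩ := hinv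
    simp only at hMmem hMmax hm0mem hm0min htt ⊢
    -- M = x.1
    have hpermF : (Q'.map Prod.fst).Perm (temp.map Prod.fst) := hQtemp.map _
    have hMx : M = x.1 := by
      obtain ⟨y, hy, hyM⟩ := List.mem_map.mp (hpermF.mem_iff.mp hMmem)
      have h1 := (hxall y hy).1
      have h2 := hMmax x.1 (hpermF.mem_iff.mpr (List.mem_map.mpr ⟨x, hxmem, rfl⟩))
      omega
    -- m0 = x.2
    have hpermFil : ((Q'.filter (fun p => p.1 == M)).map Prod.snd).Perm
        ((temp.filter (fun p => p.1 == M)).map Prod.snd) := (hQtemp.filter _).map _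
    have hxfil : x ∈ temp.filter (fun p => p.1 == M) := by
      rw [List.mem_filter]; exact ⟨hxmem, by simp [hMx]⟩
    have hm0x : m0 = x.2 := by
      obtain ⟨y, hy, hym⟩ := List.mem_map.mp (hpermFil.mem_iff.mp hm0mem)
      rw [List.mem_filter] at hy
      have hy1 : y.1 = x.1 := by rw [← hMx]; simpa using hy.2
      have h1 := (hxall y hy.1).2 hy1
      have h2 := hm0min x.2 (hpermFil.mem_iff.mpr (List.mem_map.mpr ⟨x, hxfil, rfl⟩))
      omega
    -- the remaining min-sides of A as a multiset
    have hpermlow : ((temp.erase x).map Prod.snd).Perm ((temp.map Prod.snd).erase x.2) := by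
      have p1 : temp.Perm (x :: temp.erase x) := List.perm_cons_erase hxmem
      have p2 : (temp.map Prod.snd).Perm (x.2 :: (temp.erase x).map Prod.snd) := by
        simpa using p1.map Prod.snd
      have p3 : (temp.map Prod.snd).Perm (x.2 :: (temp.map Prod.snd).erase x.2) :=
        List.perm_cons_erase (List.mem_map.mpr ⟨x, hxmem, rfl⟩)
      exact (p2.symm.trans p3).cons_inv
    -- L2 is not none: temp has at least two rows
    obtain ⟨v, rfl⟩ : ∃ v, L2 = some v := by
      cases L2 with
      | none =>
        exfalso
        simp only at htt
        have : (Q'.map Prod.snd).length = temp.length := by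
          rw [List.length_map, hQtemp.length_eq]
        rw [htt] at this
        simp at this; omega
      | some v => exact ⟨v, rfl⟩
    obtain ⟨rs, hrs, hvL1, hrsle⟩ := htt
    have hSperm : (temp.map Prod.snd).Perm (L1 :: v :: rs) :=
      ((hQtemp.map Prod.snd).symm.trans hrs)
    rw [hMx, hm0x]
    by_cases hcase : x.2 = L1
    · -- the removed min-side is the largest: the answer uses the second largest v
      have hE : ((temp.erase x).map Prod.snd).Perm (v :: rs) := by
        have := hpermlow.trans (hSperm.erase x.2)
        rwa [hcase, List.erase_cons_head] at this
      have hhv : h2.2 = v := by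
        have h1 : h2.2 ∈ v :: rs := hE.mem_iff.mp (List.mem_map.mpr ⟨h2, hh2mem, rfl⟩)
        have h2le : h2.2 ≤ v := by
          rcases List.mem_cons.mp h1 with e | hmem
          · omega
          · exact hrsle _ hmem
        have hvmem : v ∈ (temp.erase x).map Prod.snd := hE.mem_iff.mpr List.mem_cons_self
        obtain ⟨y, hy, hyv⟩ := List.mem_map.mp hvmem
        have := hh2max y hy
        omega
      rw [hhv]
      have : (x.2 == L1) = true := by simp [hcase]
      rw [this]
      simp
    · -- the removed min-side is not the largest: the answer uses L1
      have hEr : ((temp.map Prod.snd).erase x.2).Perm (L1 :: ((v :: rs).erase x.2)) := by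
        refine (hSperm.erase x.2).trans ?_
        rw [List.erase_cons_tail (by simp; omega)]
      have hE : ((temp.erase x).map Prod.snd).Perm (L1 :: ((v :: rs).erase x.2)) :=
        hpermlow.trans hEr
      have hhL1 : h2.2 = L1 := by
        have h1 : h2.2 ∈ L1 :: ((v :: rs).erase x.2) :=
          hE.mem_iff.mp (List.mem_map.mpr ⟨h2, hh2mem, rfl⟩)
        have h2le : h2.2 ≤ L1 := by
          rcases List.mem_cons.mp h1 with e | hmem
          · omega
          · have : h2.2 ∈ v :: rs := List.mem_of_mem_erase hmem
            rcases List.mem_cons.mp this with e | hmem2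
            · omega
            · have := hrsle _ hmem2; omega
        have hL1mem : L1 ∈ (temp.erase x).map Prod.snd := hE.mem_iff.mpr List.mem_cons_self
        obtain ⟨y, hy, hyv⟩ := List.mem_map.mp hL1mem
        have := hh2max y hy
        omega
      rw [hhL1]
      have : (x.2 == L1) = false := by simp [hcase]
      rw [this]
      simp

-- ===== VERDICT (by name: the statement is the Claim_ definition above) =====
theorem solution_spec : Claim_equal_solution := by
  intro sizes _ hpre
  unfold Spec_solution
  exact solution_spec_aux sizes hpre
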